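-- pv_equiv track=rewrite | github.com/athulkrishnapp/sahaayikha | app/utils.py | get_keywords
-- ===== SOURCE A (Python) =====
-- def get_keywords(text):
--     """
--     Extracts potential keywords from text by removing common stop words.
--     Returns a set of lowercase words.
--     """
--     if not text:
--         return set()
--
--     stop_words = {
--         'a', 'an', 'the', 'in', 'on', 'of', 'for', 'to', 'with', 'is', 'it', 'and',
--         'or', 'i', 'you', 'he', 'she', 'we', 'they', 'item', 'good', 'condition',
--         'was', 'are', 'be', 'been', 'has', 'had', 'do', 'does', 'did', 'will',
--         'shall', 'should', 'can', 'could', 'may', 'might', 'must', 'about', 'above',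
--         'after', 'again', 'against', 'all', 'am', 'any', 'as', 'at', 'because',
--         'before', 'below', 'between', 'both', 'but', 'by', 'down', 'during', 'each',
--         'few', 'from', 'further', 'here', 'how', 'into', 'just', 'more', 'most',
--         'my', 'no', 'nor', 'not', 'now', 'only', 'other', 'our', 'out', 'over',
--         'own', 'same', 'so', 'some', 'such', 'than', 'that', 'then', 'there', 'these',
--         'this', 'those', 'through', 'too', 'under', 'until', 'up', 'very', 'what',
--         'when', 'where', 'which', 'while', 'who', 'whom', 'why', 'your'
--     }
--
--     # Basic cleaning: remove punctuation and convert to lowercase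
--     cleaned_text = ''.join(c.lower() if c.isalnum() or c.isspace() else ' ' for c in text)
--     words = cleaned_text.split()
--
--     # Filter out stop words and short words
--     return {word for word in words if word not in stop_words and len(word) > 2}
-- ===== SOURCE B (Python) =====
-- def get_keywords(text):
--     """
--     Extracts potential keywords from text by removing common stop words.
--     Index-based scanner: find each maximal alphanumeric run with an inner
--     while loop, lowercase the slice, filter it, add it to the result set.
--     Returns a set of lowercase words.
--     """
--     if not text:
--         return set()
--
--     stop_words = frozenset(
--         "a an the in on of for to with is it and or i you he she we they item good "
--         "condition was are be been has had do does did will shall should can could "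
--         "may might must about above after again against all am any as at because "
--         "before below between both but by down during each few from further here how "
--         "into just more most my no nor not now only other our out over own same so "
--         "some such than that then there these this those through too under until up "
--         "very what when where which while who whom why your".split())
--
--     result = set()
--     i, n = 0, len(text)
--     while i < n:
--         if text[i].isalnum():
--             j = i
--             while j < n and text[j].isalnum():
--                 j += 1
--             word = text[i:j].lower()
--             if word not in stop_words and len(word) > 2:
--                 result.add(word)
--             i = j
--         else:
--             i += 1
--     return result
-- ===== Notes on version B (the rewrite author's own statement) =====
-- stated objective: alternative
-- what changed: Replaced the clean-whole-string-then-split-then-filter pipeline by an index-based scanner that finds each maximal alphanumeric run directly, lowercases the slice and filters it on the fly, building no intermediate cleaned string or word list; the stop-word set is built by splitting one string instead of a 105-element set literal.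
import Mathlib
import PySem

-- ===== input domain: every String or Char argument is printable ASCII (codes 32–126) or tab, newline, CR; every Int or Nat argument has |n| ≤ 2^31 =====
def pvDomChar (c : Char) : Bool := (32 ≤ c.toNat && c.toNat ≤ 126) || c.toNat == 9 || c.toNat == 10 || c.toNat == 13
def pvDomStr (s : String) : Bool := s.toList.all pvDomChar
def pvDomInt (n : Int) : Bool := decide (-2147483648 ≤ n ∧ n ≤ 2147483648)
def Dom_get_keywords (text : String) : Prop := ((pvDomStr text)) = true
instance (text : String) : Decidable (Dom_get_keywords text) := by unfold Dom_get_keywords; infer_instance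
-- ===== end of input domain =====

-- B replaces A's clean-the-whole-string-then-split pipeline by an index-based scanner
-- that extracts each maximal alphanumeric run directly, lowercases the slice and filters
-- it on the fly (objective: alternative decomposition, no intermediate cleaned string or word list).


-- ===== PORT A =====
-- A's stop-word set literal
def pvStopList : List String :=
  ["a", "an", "the", "in", "on", "of", "for", "to", "with", "is", "it", "and",
   "or", "i", "you", "he", "she", "we", "they", "item", "good", "condition",
   "was", "are", "be", "been", "has", "had", "do", "does", "did", "will",
   "shall", "should", "can", "could", "may", "might", "must", "about", "above",
   "after", "again", "against", "all", "am", "any", "as", "at", "because",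
   "before", "below", "between", "both", "but", "by", "down", "during", "each",
   "few", "from", "further", "here", "how", "into", "just", "more", "most",
   "my", "no", "nor", "not", "now", "only", "other", "our", "out", "over",
   "own", "same", "so", "some", "such", "than", "that", "then", "there", "these",
   "this", "those", "through", "too", "under", "until", "up", "very", "what",
   "when", "where", "which", "while", "who", "whom", "why", "your"]

def pvStop : PySem.Set String := PySem.Set.ofList pvStopList

-- A's filter 'word not in stop_words and len(word) > 2'
def pvKeep (w : String) : Bool := !(PySem.Set.contains pvStop w) && decide (2 < PySem.Str.len w)

-- the per-character cleaning of A's generator expression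
def pvClean (c : Char) : Char :=
  if PySem.Chars.isalnum c || PySem.Chars.isspace c then PySem.Chars.lowerChar c else ' '

def get_keywords (text : String) : List String :=
  if text = "" then []
  else
    let cleaned := String.ofList (text.toList.map pvClean)
    let words := PySem.Str.split₀ cleaned
    PySem.Set.ofList (words.filter pvKeep)

-- ===== PORT B =====
-- B's stop-word set: frozenset("a an the … your".split())
def pvStopB : PySem.Set String :=
  PySem.Set.ofList (PySem.Str.split₀ "a an the in on of for to with is it and or i you he she we they item good condition was are be been has had do does did will shall should can could may might must about above after again against all am any as at because before below between both but by down during each few from further here how into just more most my no nor not now only other our out over own same so some such than that then there these this those through too under until up very what when where which while who whom why your")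

-- B's filter 'word not in stop_words and len(word) > 2'
def pvKeepB (w : String) : Bool := !(PySem.Set.contains pvStopB w) && decide (2 < PySem.Str.len w)

-- B's outer while loop over the remaining characters; the inner 'while j < n and
-- text[j].isalnum(): j += 1' plus the slice text[i:j] become takeWhile/dropWhile
def pvScanB (acc : PySem.Set String) : List Char → PySem.Set String
  | [] => acc
  | c :: cs =>
    if PySem.Chars.isalnum c then
      let w := PySem.Str.lower (String.ofList (List.takeWhile PySem.Chars.isalnum (c :: cs)))
      pvScanB (if pvKeepB w then PySem.Set.add acc w else acc)
        (List.dropWhile PySem.Chars.isalnum (c :: cs))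
    else pvScanB acc cs
  termination_by cs => cs.length
  decreasing_by
    · simp only [List.dropWhile_cons, *, if_pos]
      exact Nat.lt_succ_of_le (List.length_dropWhile_le _ _)
    · exact Nat.lt_succ_self _

def get_keywords_alt (text : String) : List String :=
  if text = "" then [] else pvScanB PySem.Set.empty text.toList

-- ===== PRECONDITION & SPEC =====
def Spec_get_keywords (text : String) (out : List String) : Prop := out = get_keywords_alt text
instance (text : String) (out : List String) : Decidable (Spec_get_keywords text out) := by unfold Spec_get_keywords; infer_instance

-- ===== CLAIM (what is proved, stated in full; the proofs are below) =====
def Claim_equal_get_keywords : Prop := ∀ (text : String), Dom_get_keywords text → Spec_get_keywords text (get_keywords text)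

-- ===== LEMMAS AND PROOFS =====

-- the two stop-word sets are the same set
set_option maxRecDepth 40000 in
set_option maxHeartbeats 1000000 in
theorem pvStopB_eq : pvStopB = pvStop := by decide

theorem pvKeepB_eq : pvKeepB = pvKeep := by
  funext w; simp [pvKeepB, pvKeep, pvStopB_eq]

-- common specification: the lowercased words of the text, one recursion
def pvWords (buf : List Char) : List Char → List (List Char)
  | [] => if buf = [] then [] else [buf]
  | c :: cs =>
      if PySem.Chars.isalnum c then pvWords (buf ++ [PySem.Chars.lowerChar c]) cs
      else if buf = [] then pvWords [] cs else buf :: pvWords [] cs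

-- on domain characters, cleaning maps boundaries exactly to whitespace
theorem pvClean_isspace_fin : ∀ n : Fin 127,
    PySem.Chars.isspace (pvClean (Char.ofNat n.val)) = !PySem.Chars.isalnum (Char.ofNat n.val) := by
  decide

theorem pvClean_isspace (c : Char) (h : pvDomChar c = true) :
    PySem.Chars.isspace (pvClean c) = !PySem.Chars.isalnum c := by
  have hlt : c.toNat < 127 := by
    simp [pvDomChar] at h; omega
  have := pvClean_isspace_fin ⟨c.toNat, hlt⟩
  simpa using this

theorem pvClean_of_alnum (c : Char) (h : PySem.Chars.isalnum c = true) :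
    pvClean c = PySem.Chars.lowerChar c := by
  simp [pvClean, h]

-- A-side: split₀'s worker on the cleaned characters computes pvWords
theorem go_eq_pvWords (cs : List Char) (h : ∀ c ∈ cs, pvDomChar c = true) :
    ∀ (cur : List Char) (acc : List (List Char)),
      PySem.Chars.split₀.go (cs.map pvClean) cur acc = acc.reverse ++ pvWords cur.reverse cs := by
  induction cs with
  | nil =>
      intro cur acc
      rw [List.map_nil, PySem.Chars.split₀.go.eq_def]
      by_cases hcur : cur = []
      · simp [hcur, pvWords]
      · simp [hcur, pvWords, List.isEmpty_iff]
  | cons c cs ih =>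
      intro cur acc
      have hc : pvDomChar c = true := h c (List.mem_cons_self)
      have hcs : ∀ x ∈ cs, pvDomChar x = true := fun x hx => h x (List.mem_cons_of_mem _ hx)
      rw [List.map_cons, PySem.Chars.split₀.go.eq_def]
      simp only []
      by_cases ha : PySem.Chars.isalnum c = true
      · have hsp : PySem.Chars.isspace (pvClean c) = false := by
          rw [pvClean_isspace c hc, ha]; rfl
        rw [if_neg (by simp [hsp])]
        rw [ih hcs (pvClean c :: cur) acc]
        simp [pvWords, ha, pvClean_of_alnum c ha]
      · have hsp : PySem.Chars.isspace (pvClean c) = true := by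
          rw [pvClean_isspace c hc]; simp [ha]
        rw [if_pos hsp]
        by_cases hcur : cur = []
        · rw [if_pos (by simp [hcur])]
          rw [ih hcs [] acc]
          simp [pvWords, ha, hcur]
        · rw [if_neg (by simp [hcur])]
          rw [ih hcs [] (cur.reverse :: acc)]
          simp [pvWords, ha, hcur]

-- a non-empty buffer absorbs the next alnum run and is flushed at the boundary
theorem pvWords_acc (cs : List Char) : ∀ (buf : List Char), buf ≠ [] →
    pvWords buf cs
      = (buf ++ (cs.takeWhile PySem.Chars.isalnum).map PySem.Chars.lowerChar)
        :: pvWords [] (cs.dropWhile PySem.Chars.isalnum) := by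
  induction cs with
  | nil => intro buf hb; simp [pvWords, hb]
  | cons c cs ih =>
      intro buf hb
      by_cases ha : PySem.Chars.isalnum c = true
      · rw [pvWords, if_pos ha, ih _ (by simp)]
        simp [ha]
      · rw [pvWords, if_neg ha, if_neg hb]
        have h2 : pvWords [] (c :: cs) = pvWords [] cs := by rw [pvWords]; simp [ha]
        simp [ha, h2]

-- Str.lower on an explicit character list is the per-character map
theorem pvLower_ofList (l : List Char) :
    PySem.Str.lower (String.ofList l) = String.ofList (l.map PySem.Chars.lowerChar) := by
  have h : (PySem.Str.lower (String.ofList l)).toList = l.map PySem.Chars.lowerChar := by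
    simp [PySem.Str.toList_lower, PySem.Chars.lower]
  rw [← h, String.ofList_toList]

-- B-side: the scanner computes the same filtered word set
theorem pvScanB_eq (acc : PySem.Set String) (cs : List Char) :
    pvScanB acc cs = PySem.Set.update acc (((pvWords [] cs).map String.ofList).filter pvKeep) := by
  induction acc, cs using pvScanB.induct with
  | case1 acc => simp [pvScanB, pvWords, PySem.Set.update]
  | case2 acc c cs ha w ih =>
      rw [pvScanB, if_pos ha]
      show pvScanB (if pvKeepB w = true then acc.add w else acc)
          (List.dropWhile PySem.Chars.isalnum (c :: cs)) = _
      have hw : pvWords [] (c :: cs)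
          = (List.map PySem.Chars.lowerChar (List.takeWhile PySem.Chars.isalnum (c :: cs)))
            :: pvWords [] (List.dropWhile PySem.Chars.isalnum (c :: cs)) := by
        rw [pvWords, if_pos ha, List.nil_append,
          pvWords_acc cs [PySem.Chars.lowerChar c] (by simp)]
        simp [ha]
      have hws : w = String.ofList
          (List.map PySem.Chars.lowerChar (List.takeWhile PySem.Chars.isalnum (c :: cs))) :=
        pvLower_ofList _
      simp only [dite_eq_ite] at ih
      rw [ih, hw]
      by_cases hk : pvKeep w = true
      · rw [if_pos (by rw [pvKeepB_eq]; exact hk)]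
        rw [List.map_cons, List.filter_cons, ← hws, hk]
        simp [PySem.Set.update]
      · rw [if_neg (by rw [pvKeepB_eq]; simpa using hk)]
        rw [List.map_cons, List.filter_cons, ← hws]
        simp [hk]
  | case3 acc c cs ha ih =>
      rw [pvScanB, if_neg ha, ih]
      have h2 : pvWords [] (c :: cs) = pvWords [] cs := by rw [pvWords]; simp [ha]
      simp [h2]

-- ===== VERDICT (by name: the statement is the Claim_ definition above) =====
theorem get_keywords_spec : Claim_equal_get_keywords := by
  intro text hdom
  unfold Spec_get_keywords get_keywords get_keywords_alt
  by_cases ht : text = ""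
  · simp [ht]
  · rw [if_neg ht, if_neg ht]
    have hchars : ∀ c ∈ text.toList, pvDomChar c = true := by
      have := hdom
      simpa [Dom_get_keywords, pvDomStr, List.all_eq_true] using this
    have hA : PySem.Str.split₀ (String.ofList (text.toList.map pvClean))
        = (pvWords [] text.toList).map String.ofList := by
      unfold PySem.Str.split₀
      congr 1
      rw [String.toList_ofList]
      have := go_eq_pvWords text.toList hchars [] []
      simpa [PySem.Chars.split₀] using this
    rw [pvScanB_eq]
    simp [hA, PySem.Set.update, PySem.Set.ofList]
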